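-- pv_equiv track=rewrite | github.com/andreahn/advent-of-code | 2023/7/part2.py | findTotalForCardsOfType
-- ===== SOURCE A (Python) =====
-- cards = {
--     'A':13, 'K':12, 'Q':11, 'T':10, '9':9, '8':8, '7':7, '6':6, '5':5, '4':4, '3':3, '2':2, 'J':1
-- }
--
-- def customSort(toBeSorted, index = 0):
--     sortedList = []
--
--     for card in cards:
--         handsWithCardsAtIndex = list(filter(lambda x: x.get("hand")[index] == card, toBeSorted))
--
--         if len(handsWithCardsAtIndex) > 1:
--             handsWithCardsAtIndex = customSort(handsWithCardsAtIndex, index + 1)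
--
--         sortedList += handsWithCardsAtIndex
--
--     return sortedList
--
-- def findTotalForCardsOfType(handsToFindTotalFor, startRank):
--     rank = startRank
--     handsToFindTotalFor = customSort(handsToFindTotalFor)
--     totalForCards = 0
--
--     if handsToFindTotalFor is None:
--         return [totalForCards, rank]
--
--     for hand in handsToFindTotalFor:
--         totalForCards += rank * int(hand.get('bid'))
--         rank -= 1
--
--     return [totalForCards, rank]
-- ===== SOURCE B (Python) =====
-- cards = {
--     'A':13, 'K':12, 'Q':11, 'T':10, '9':9, '8':8, '7':7, '6':6, '5':5, '4':4, '3':3, '2':2, 'J':1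
-- }
--
-- def findTotalForCardsOfType(handsToFindTotalFor, startRank):
--     ordered = sorted(handsToFindTotalFor,
--                      key=lambda h: [cards[c] for c in h.get('hand')],
--                      reverse=True)
--     total = sum((startRank - i) * int(h.get('bid')) for i, h in enumerate(ordered))
--     return [total, startRank - len(ordered)]
-- ===== Notes on version B (the rewrite author's own statement) =====
-- stated objective: idiomatic
-- what changed: Replaces A's hand-rolled recursive 13-way bucket (MSD radix) sort customSort and its running (total, rank) accumulator loop by a single sorted(..., key=[card values], reverse=True) call plus a closed-form enumerate sum and rank = startRank - len.
-- outside the precondition, e.g. on findTotalForCardsOfType([{'hand': 'X2', 'bid': '7'}], 3): A returns [0, 3], B raises KeyError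
import Mathlib
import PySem

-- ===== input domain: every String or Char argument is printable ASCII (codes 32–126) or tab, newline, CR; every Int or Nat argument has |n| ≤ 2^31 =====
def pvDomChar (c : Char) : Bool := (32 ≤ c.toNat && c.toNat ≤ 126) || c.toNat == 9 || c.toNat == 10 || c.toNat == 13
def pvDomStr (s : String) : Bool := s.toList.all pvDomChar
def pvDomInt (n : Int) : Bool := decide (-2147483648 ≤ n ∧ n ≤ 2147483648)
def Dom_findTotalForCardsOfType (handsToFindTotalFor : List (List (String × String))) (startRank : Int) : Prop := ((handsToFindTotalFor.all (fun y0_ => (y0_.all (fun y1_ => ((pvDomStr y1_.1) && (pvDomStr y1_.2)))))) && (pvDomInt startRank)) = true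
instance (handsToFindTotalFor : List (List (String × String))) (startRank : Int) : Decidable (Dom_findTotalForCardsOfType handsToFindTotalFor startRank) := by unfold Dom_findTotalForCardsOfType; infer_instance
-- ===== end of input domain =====

-- B replaces A's hand-rolled recursive 13-way bucket sort (customSort) by a single
-- sorted(..., key=…, reverse=True) call plus a closed-form rank/total computation
-- (objective: idiomatic/simpler). Equivalence is proved on hands made of card
-- characters with no hand a prefix of another (A raises IndexError on prefix/duplicate
-- hands; A silently DROPS hands containing a non-card character, where B raises KeyError
-- — those inputs are excluded by Pre_, see the comment there).

-- the module constant `cards` (dict literal, insertion order A,K,…,J)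
def pvCards : List (Char × Int) :=
  [('A',13),('K',12),('Q',11),('T',10),('9',9),('8',8),('7',7),('6',6),('5',5),('4',4),('3',3),('2',2),('J',1)]

-- h.get(k) on a Python dict given as an association list (dict construction: later keys overwrite)
def pvGet (x : List (String × String)) (k : String) : Option String :=
  (PySem.Dict.ofList x).get? k

-- int(h.get('bid')); the .getD 0 default is never reached under Pre_ (bid present and int-parsable)
def pvBid (h : List (String × String)) : Int :=
  ((pvGet h "bid").bind PySem.Int.ofStr?).getD 0

-- ===== PORT A =====
-- customSort with a fuel argument that only makes the recursion total; the top-level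
-- call passes enough fuel that it is never exhausted (bucket members at index i have
-- length > i, so the recursion depth is bounded by the longest hand).
def customSortF : Nat → List (List (String × String)) → Int → List (List (String × String))
  | 0, _, _ => []
  | fuel+1, toBeSorted, index =>
      pvCards.foldl (fun sortedList cv =>
        let handsWithCardsAtIndex := toBeSorted.filter
          (fun x => ((pvGet x "hand").bind (fun s => PySem.Str.pyGet? s index)) == some cv.1)
        let handsWithCardsAtIndex :=
          if 1 < handsWithCardsAtIndex.length then customSortF fuel handsWithCardsAtIndex (index + 1)
          else handsWithCardsAtIndex
        sortedList ++ handsWithCardsAtIndex) []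

def findTotalForCardsOfType (handsToFindTotalFor : List (List (String × String))) (startRank : Int) : List Int :=
  let rank := startRank
  let sortedHands := customSortF
    (1 + (handsToFindTotalFor.map (fun x => ((pvGet x "hand").getD "").toList.length)).sum)
    handsToFindTotalFor 0
  let totalForCards : Int := 0
  -- Python's `if handsToFindTotalFor is None` is always False here (customSort returns a list)
  let st := sortedHands.foldl
    (fun (acc : Int × Int) hand => (acc.1 + acc.2 * pvBid hand, acc.2 - 1))
    (totalForCards, rank)
  [st.1, st.2]

-- ===== PORT B =====
-- cards[c]; the .getD 0 default is never reached under Pre_ (every card char is a key)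
def pvCardVal (c : Char) : Int := (pvCards.lookup c).getD 0

-- key=lambda h: [cards[c] for c in h.get('hand')]
def pvKey (h : List (String × String)) : List Int :=
  ((pvGet h "hand").getD "").toList.map pvCardVal

def findTotalForCardsOfType_alt (handsToFindTotalFor : List (List (String × String))) (startRank : Int) : List Int :=
  let ordered := PySem.List.sorted handsToFindTotalFor pvKey true
  let total := ((PySem.List.enumerate ordered).map
    (fun p => (startRank - p.1) * pvBid p.2)).sum
  [total, startRank - ordered.length]

-- ===== PRECONDITION & SPEC =====
-- hand chars as a char list (h.get('hand'), empty if the key is missing)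
def pvChars (x : List (String × String)) : List Char := ((pvGet x "hand").getD "").toList

-- Pre_ excludes (a) hands containing a character that is not a card: A silently DROPS such a
-- hand from the sort (an artefact of customSort's bucket loop) while B raises KeyError there;
-- (b) inputs where A raises: an empty/missing hand or two hands one of which is a prefix of
-- the other (IndexError), and a missing or non-integer bid (TypeError/ValueError).
def Pre_findTotalForCardsOfType (handsToFindTotalFor : List (List (String × String))) (startRank : Int) : Prop :=
  (handsToFindTotalFor.all (fun x =>
      (!(pvChars x).isEmpty) &&
      (pvChars x).all (fun c => decide (c ∈ "AKQT98765432J".toList)) &&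
      ((pvGet x "bid").bind PySem.Int.ofStr?).isSome)) = true ∧
  handsToFindTotalFor.Pairwise
    (fun x y => ¬ pvChars x <+: pvChars y ∧ ¬ pvChars y <+: pvChars x)

instance (handsToFindTotalFor : List (List (String × String))) (startRank : Int) : Decidable (Pre_findTotalForCardsOfType handsToFindTotalFor startRank) := by unfold Pre_findTotalForCardsOfType; infer_instance

def pvWitness_findTotalForCardsOfType : (List (List (String × String))) × Int :=
  ([[("hand","AK"),("bid","10")],[("hand","AJ"),("bid","5")]], 2)

def Spec_findTotalForCardsOfType (handsToFindTotalFor : List (List (String × String))) (startRank : Int) (out : List Int) : Prop := out = findTotalForCardsOfType_alt handsToFindTotalFor startRank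
instance (handsToFindTotalFor : List (List (String × String))) (startRank : Int) (out : List Int) : Decidable (Spec_findTotalForCardsOfType handsToFindTotalFor startRank out) := by unfold Spec_findTotalForCardsOfType; infer_instance

-- ===== CLAIM (what is proved, stated in full; the proofs are below) =====
def Claim_equal_findTotalForCardsOfType : Prop := ∀ (handsToFindTotalFor : List (List (String × String))) (startRank : Int), Dom_findTotalForCardsOfType handsToFindTotalFor startRank → Pre_findTotalForCardsOfType handsToFindTotalFor startRank → Spec_findTotalForCardsOfType handsToFindTotalFor startRank (findTotalForCardsOfType handsToFindTotalFor startRank)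

-- ===== LEMMAS AND PROOFS =====

def pvCardChars : List Char := pvCards.map (·.1)

theorem pvCardChars_eq : "AKQT98765432J".toList = pvCardChars := by decide

-- lex order on List Int: equal prefixes, smaller element ⇒ smaller list
theorem pv_lex_of_take (i : Nat) (a b : List Int) (ha : i < a.length) (hb : i < b.length)
    (ht : a.take i = b.take i) (h : a[i] < b[i]) : a < b := by
  induction i generalizing a b with
  | zero =>
    cases a with
    | nil => simp at ha
    | cons x xs =>
      cases b with
      | nil => simp at hb
      | cons y ys => exact List.cons_lt_cons_iff.mpr (Or.inl (by simpa using h))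
  | succ n ih =>
    cases a with
    | nil => simp at ha
    | cons x xs =>
      cases b with
      | nil => simp at hb
      | cons y ys =>
        simp only [List.take_succ_cons, List.cons.injEq] at ht
        exact List.cons_lt_cons_iff.mpr (Or.inr ⟨ht.1, ih xs ys (by simpa using ha) (by simpa using hb) ht.2 (by simpa using h)⟩)

-- disjoint filters concatenate to the filter of the disjunction
theorem pv_filter_append_perm {α β : Type} [DecidableEq β] (f : α → β) (c : β) (cs : List β)
    (hc : c ∉ cs) (l : List α) :
    ((l.filter (fun x => decide (f x = c))) ++ (l.filter (fun x => decide (f x ∈ cs)))).Perm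
      (l.filter (fun x => decide (f x ∈ c :: cs))) := by
  induction l with
  | nil => simp
  | cons x l ih =>
    by_cases hx : f x = c
    · have hnc : f x ∉ cs := by rw [hx]; exact hc
      have e1 : List.filter (fun y => decide (f y = c)) (x :: l) = x :: List.filter (fun y => decide (f y = c)) l := by
        simp [List.filter_cons, hx]
      have e2 : List.filter (fun y => decide (f y ∈ cs)) (x :: l) = List.filter (fun y => decide (f y ∈ cs)) l := by
        simp [List.filter_cons, hnc]
      have e3 : List.filter (fun y => decide (f y ∈ c :: cs)) (x :: l) = x :: List.filter (fun y => decide (f y ∈ c :: cs)) l := by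
        simp [List.filter_cons, hx]
      rw [e1, e2, e3, List.cons_append]
      exact ih.cons x
    · by_cases hx2 : f x ∈ cs
      · have e1 : List.filter (fun y => decide (f y = c)) (x :: l) = List.filter (fun y => decide (f y = c)) l := by
          simp [List.filter_cons, hx]
        have e2 : List.filter (fun y => decide (f y ∈ cs)) (x :: l) = x :: List.filter (fun y => decide (f y ∈ cs)) l := by
          simp [List.filter_cons, hx2]
        have e3 : List.filter (fun y => decide (f y ∈ c :: cs)) (x :: l) = x :: List.filter (fun y => decide (f y ∈ c :: cs)) l := by
          simp [List.filter_cons, hx2]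
        rw [e1, e2, e3]
        exact List.perm_middle.trans (ih.cons x)
      · have e1 : List.filter (fun y => decide (f y = c)) (x :: l) = List.filter (fun y => decide (f y = c)) l := by
          simp [List.filter_cons, hx]
        have e2 : List.filter (fun y => decide (f y ∈ cs)) (x :: l) = List.filter (fun y => decide (f y ∈ cs)) l := by
          simp [List.filter_cons, hx2]
        have e3 : List.filter (fun y => decide (f y ∈ c :: cs)) (x :: l) = List.filter (fun y => decide (f y ∈ c :: cs)) l := by
          simp [List.filter_cons, hx, hx2]
        rw [e1, e2, e3]
        exact ih

-- concatenating all buckets is a permutation of the list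
theorem pv_flatMap_filter_perm {α β : Type} [DecidableEq β] (f : α → β) (cs : List β)
    (hnd : cs.Nodup) (l : List α) :
    (cs.flatMap (fun c => l.filter (fun x => decide (f x = c)))).Perm
      (l.filter (fun x => decide (f x ∈ cs))) := by
  induction cs with
  | nil => simp
  | cons c cs ih =>
    have hc : c ∉ cs := (List.nodup_cons.mp hnd).1
    have ih' := ih (List.nodup_cons.mp hnd).2
    have h1 : List.flatMap (fun c => l.filter (fun x => decide (f x = c))) (c :: cs)
        = l.filter (fun x => decide (f x = c)) ++ cs.flatMap (fun c => l.filter (fun x => decide (f x = c))) := by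
      simp [List.flatMap_cons]
    rw [h1]
    exact (ih'.append_left _).trans (pv_filter_append_perm f c cs hc l)

theorem pvKey_eq (x : List (String × String)) : pvKey x = (pvChars x).map pvCardVal := rfl

theorem pv_pairwise_short {α : Type} {R : α → α → Prop} (l : List α) (h : l.length ≤ 1) :
    l.Pairwise R := by
  cases l with
  | nil => exact List.Pairwise.nil
  | cons a t => cases t with
    | nil => simp
    | cons b t => simp at h

-- the heart of the proof: on prefix-free card-char hands, customSort is the unique
-- permutation that is strictly descending in the full card-value key
theorem pv_customSort_spec (fuel : Nat) :
    ∀ (l : List (List (String × String))) (i : Nat),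
    (∀ x ∈ l, ∀ c ∈ pvChars x, c ∈ pvCardChars) →
    (∀ x ∈ l, i < (pvChars x).length) →
    (∀ x ∈ l, ∀ y ∈ l, (pvChars x).take i = (pvChars y).take i) →
    l.Pairwise (fun x y => ¬ pvChars x <+: pvChars y ∧ ¬ pvChars y <+: pvChars x) →
    (∀ x ∈ l, (pvChars x).length - i < fuel) →
    0 < fuel →
    (customSortF fuel l (i : Int)).Perm l ∧
    (customSortF fuel l (i : Int)).Pairwise (fun a b => pvKey b < pvKey a) := by
  induction fuel with
  | zero => intro l i _ _ _ _ _ h0; omega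
  | succ fuel ih =>
    intro l i hgood h5 h4 h3 hfuel _
    -- the bucket of a card and the per-card step of the loop
    set bucket : Char → List (List (String × String)) := fun c =>
      l.filter (fun x => ((pvGet x "hand").bind (fun s => PySem.Str.pyGet? s (i : Int))) == some c) with hbucket
    set step : Char → List (List (String × String)) := fun c =>
      if 1 < (bucket c).length then customSortF fuel (bucket c) ((i : Int) + 1) else bucket c with hstep
    have hcs : customSortF (fuel+1) l (i : Int) = pvCardChars.flatMap step := by
      have h1 : customSortF (fuel+1) l (i : Int)
          = pvCards.foldl (fun acc cv => acc ++ step cv.1) [] := rfl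
      rw [h1, PySem.List.foldl_append_eq_flatMap]
      simp only [List.nil_append, pvCardChars]
      rw [List.flatMap_map]
    -- the filter predicate, on members of l, is the i-th hand character
    have hchar : ∀ x ∈ l, ((pvGet x "hand").bind (fun s => PySem.Str.pyGet? s (i : Int))) = (pvChars x)[i]? := by
      intro x hx
      have h5x := h5 x hx
      cases hg : pvGet x "hand" with
      | none => exfalso; simp [pvChars, hg] at h5x
      | some s => simp [pvChars, hg]
    have hmem_bucket : ∀ c, ∀ x ∈ l, (x ∈ bucket c ↔ (pvChars x)[i]? = some c) := by
      intro c x hx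
      rw [hbucket]
      simp only [List.mem_filter, beq_iff_eq]
      constructor
      · rintro ⟨hx2, he⟩; rw [hchar x hx2] at he; exact he
      · intro he; exact ⟨hx, by rw [hchar x hx]; exact he⟩
    have hbsub : ∀ c, (bucket c).Sublist l := fun c => List.filter_sublist
    -- shared prefixes of length i+1 inside a bucket
    have htake1 : ∀ c, ∀ u ∈ bucket c, ∀ v ∈ bucket c,
        (pvChars u).take (i+1) = (pvChars v).take (i+1) := by
      intro c u hu v hv
      have hul := (hbsub c).mem hu
      have hvl := (hbsub c).mem hv
      have h1 := (hmem_bucket c u hul).mp hu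
      have h2 := (hmem_bucket c v hvl).mp hv
      rw [List.take_succ, List.take_succ, h1, h2, h4 u hul v hvl]
    -- in a bucket with at least two members every hand is longer than i+1
    have hlong : ∀ c, 1 < (bucket c).length → ∀ x ∈ bucket c, i + 1 < (pvChars x).length := by
      intro c hlen x hx
      have hpw : (bucket c).Pairwise (fun x y => ¬ pvChars x <+: pvChars y ∧ ¬ pvChars y <+: pvChars x) :=
        h3.sublist (hbsub c)
      obtain ⟨a, t, hat⟩ : ∃ a t, bucket c = a :: t := by
        cases hb : bucket c with
        | nil => rw [hb] at hlen; simp at hlen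
        | cons a t => exact ⟨a, t, rfl⟩
      obtain ⟨b, t', hbt⟩ : ∃ b t', t = b :: t' := by
        cases ht : t with
        | nil => rw [hat, ht] at hlen; simp at hlen
        | cons b t' => exact ⟨b, t', rfl⟩
      rw [hat, hbt] at hpw hx
      have hy : ∃ y, y ∈ bucket c ∧ (¬ pvChars x <+: pvChars y ∧ ¬ pvChars y <+: pvChars x) := by
        rcases List.mem_cons.mp hx with hxa | hxt
        · refine ⟨b, by rw [hat, hbt]; simp, ?_⟩
          subst hxa
          exact (List.pairwise_cons.mp hpw).1 b (by simp)
        · refine ⟨a, by rw [hat, hbt]; simp, ?_⟩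
          have := (List.pairwise_cons.mp hpw).1 x hxt
          exact ⟨this.2, this.1⟩
      obtain ⟨y, hyb, hrel⟩ := hy
      by_contra hle
      push_neg at hle
      have hxx : pvChars x = (pvChars x).take (i+1) := (List.take_of_length_le hle).symm
      have : pvChars x <+: pvChars y := by
        rw [hxx, htake1 c x (by rw [hat, hbt]; exact hx) y hyb]
        exact List.take_prefix _ _
      exact hrel.1 this
    -- each step is a permutation of its bucket
    have hih : ∀ c, 1 < (bucket c).length →
        (customSortF fuel (bucket c) ((i:Int)+1)).Perm (bucket c) ∧
        (customSortF fuel (bucket c) ((i:Int)+1)).Pairwise (fun a b => pvKey b < pvKey a) := by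
      intro c hlen
      have hcast : ((i : Int) + 1) = ((i + 1 : Nat) : Int) := by push_cast; ring
      rw [hcast]
      have h5' := hlong c hlen
      refine ih (bucket c) (i+1) (fun x hx => hgood x ((hbsub c).mem hx)) h5' (htake1 c)
        (h3.sublist (hbsub c)) ?_ ?_
      · intro x hx
        have := hfuel x ((hbsub c).mem hx)
        have := h5' x hx
        omega
      · obtain ⟨a, t, hat⟩ : ∃ a t, bucket c = a :: t := by
          cases hb : bucket c with
          | nil => rw [hb] at hlen; simp at hlen
          | cons a t => exact ⟨a, t, rfl⟩
        have ha : a ∈ bucket c := by rw [hat]; simp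
        have := hfuel a ((hbsub c).mem ha)
        have := h5' a ha
        omega
    have hsp : ∀ c, (step c).Perm (bucket c) := by
      intro c
      rw [hstep]
      by_cases hlen : 1 < (bucket c).length
      · simp only [if_pos hlen]; exact (hih c hlen).1
      · simp only [if_neg hlen]
        exact List.Perm.refl _
    have hbeq : bucket = fun c => l.filter (fun x => decide ((pvChars x)[i]? = some c)) := by
      funext c
      rw [hbucket]
      exact List.filter_congr (fun x hx => by
        rw [hchar x hx]
        cases h : (pvChars x)[i]? <;> simp [h, Bool.beq_eq_decide_eq])
    have hperm : (customSortF (fuel+1) l (i : Int)).Perm l := by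
      rw [hcs]
      have p1 : (pvCardChars.flatMap step).Perm (pvCardChars.flatMap bucket) :=
        List.Perm.flatMap (List.Perm.refl _) (fun c _ => hsp c)
      have p3 := pv_flatMap_filter_perm (fun x => (pvChars x)[i]?) (pvCardChars.map some)
        (by decide) l
      rw [List.flatMap_map] at p3
      rw [hbeq] at p1
      refine p1.trans (p3.trans (List.Perm.of_eq (List.filter_eq_self.mpr ?_)))
      intro x hx
      simp only [decide_eq_true_eq, List.mem_map]
      exact ⟨(pvChars x)[i]'(h5 x hx), hgood x hx _ (List.getElem_mem (h5 x hx)),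
        (List.getElem?_eq_some_iff.mpr ⟨h5 x hx, rfl⟩).symm⟩
    refine ⟨hperm, ?_⟩
    rw [hcs, List.pairwise_flatMap]
    constructor
    · intro c _
      by_cases hlen : 1 < (bucket c).length
      · rw [hstep]
        simp only [if_pos hlen]
        exact (hih c hlen).2
      · have : step c = bucket c := by rw [hstep]; simp only [if_neg hlen]
        rw [this]
        exact pv_pairwise_short _ (by omega)
    · have hv : pvCardChars.Pairwise (fun c c' => pvCardVal c' < pvCardVal c) := by decide
      refine hv.imp ?_
      intro c c' hval a ha b hb
      have hab : a ∈ bucket c := ((hsp c).mem_iff).mp ha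
      have hbb : b ∈ bucket c' := ((hsp c').mem_iff).mp hb
      have hal : a ∈ l := (hbsub c).mem hab
      have hbl : b ∈ l := (hbsub c').mem hbb
      have hai := (hmem_bucket c a hal).mp hab
      have hbi := (hmem_bucket c' b hbl).mp hbb
      obtain ⟨ha5, hac⟩ := List.getElem?_eq_some_iff.mp hai
      obtain ⟨hb5, hbc⟩ := List.getElem?_eq_some_iff.mp hbi
      rw [pvKey_eq, pvKey_eq]
      refine pv_lex_of_take i _ _ (by simpa using hb5) (by simpa using ha5) ?_ ?_
      · rw [← List.map_take, ← List.map_take, h4 b hbl a hal]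
      · have e1 : ((pvChars b).map pvCardVal)[i]'(by simpa using hb5) = pvCardVal ((pvChars b)[i]) :=
          List.getElem_map _
        have e2 : ((pvChars a).map pvCardVal)[i]'(by simpa using ha5) = pvCardVal ((pvChars a)[i]) :=
          List.getElem_map _
        rw [e1, e2, hac, hbc]
        exact hval


-- PySem.List.sorted does not depend on which DecidableLT instance decides the key comparison
theorem pv_sorted_decInst {α : Type} (xs : List α) (key : α → List Int)
    (D1 D2 : DecidableLT (List Int)) :
    @PySem.List.sorted α (List Int) List.instLT D1 xs key true
      = @PySem.List.sorted α (List Int) List.instLT D2 xs key true := by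
  rw [@PySem.List.sorted_rev_eq_foldl_insertBy _ _ _ D1, @PySem.List.sorted_rev_eq_foldl_insertBy _ _ _ D2]
  congr 1
  funext acc x
  congr 1
  funext a b
  exact decide_eq_decide.mpr Iff.rfl

-- shifting the start of enumerate shifts the indices in the summand
theorem pv_enum_shift (g : Int → List (String × String) → Int) (l : List (List (String × String))) :
    ∀ s : Int, ((PySem.List.enumerate l (s+1)).map (fun p => g p.1 p.2)).sum
      = ((PySem.List.enumerate l s).map (fun p => g (p.1+1) p.2)).sum := by
  induction l with
  | nil => intro s; simp [PySem.List.enumerate_nil]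
  | cons x l ih =>
    intro s
    rw [PySem.List.enumerate_cons, PySem.List.enumerate_cons]
    simp only [List.map_cons, List.sum_cons]
    rw [ih (s+1)]

-- A's running (total, rank) loop computes B's closed-form enumerate sum
theorem pv_fold_total (l : List (List (String × String))) :
    ∀ (t r : Int),
    l.foldl (fun (acc : Int × Int) hand => (acc.1 + acc.2 * pvBid hand, acc.2 - 1)) (t, r)
      = (t + ((PySem.List.enumerate l).map (fun p => (r - p.1) * pvBid p.2)).sum,
         r - l.length) := by
  induction l with
  | nil => intro t r; simp [PySem.List.enumerate_nil]
  | cons x l ih =>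
    intro t r
    rw [List.foldl_cons, ih]
    rw [PySem.List.enumerate_cons]
    simp only [List.map_cons, List.sum_cons]
    rw [pv_enum_shift (fun i h => (r - i) * pvBid h) l 0]
    have hmap : (List.map (fun p => (r - (p.1 + 1)) * pvBid p.2) (PySem.List.enumerate l)).sum
        = (List.map (fun p => (r - 1 - p.1) * pvBid p.2) (PySem.List.enumerate l)).sum := by
      congr 1
      apply List.map_congr_left
      intro p _
      ring
    rw [hmap]
    simp only [List.length_cons, Prod.mk.injEq]
    refine ⟨by ring, by push_cast; ring⟩

-- ===== VERDICT (by name: the statement is the Claim_ definition above) =====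
theorem findTotalForCardsOfType_spec : Claim_equal_findTotalForCardsOfType := by
  intro hs sr _ hpre
  obtain ⟨hallb, hpw⟩ := hpre
  have hall : ∀ x ∈ hs, pvChars x ≠ [] ∧
      (∀ c ∈ pvChars x, c ∈ "AKQT98765432J".toList) ∧
      ((pvGet x "bid").bind PySem.Int.ofStr?).isSome = true := by
    intro x hx
    have hx2 := List.all_eq_true.mp hallb x hx
    simp only [Bool.and_eq_true, Bool.not_eq_true', List.isEmpty_eq_false_iff, List.all_eq_true,
      decide_eq_true_eq] at hx2
    exact ⟨hx2.1.1, hx2.1.2, hx2.2⟩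
  unfold Spec_findTotalForCardsOfType
  set fuel := 1 + (hs.map (fun x => ((pvGet x "hand").getD "").toList.length)).sum with hfueldef
  have hspec := pv_customSort_spec fuel hs 0
    (fun x hx c hc => pvCardChars_eq ▸ (hall x hx).2.1 c hc)
    (fun x hx => by
      have := (hall x hx).1
      have := List.length_pos_iff.mpr this
      omega)
    (fun x _ y _ => by simp)
    hpw
    (fun x hx => by
      have hmem : ((pvGet x "hand").getD "").toList.length
          ∈ hs.map (fun x => ((pvGet x "hand").getD "").toList.length) := List.mem_map_of_mem hx
      have := List.le_sum_of_mem hmem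
      have : ((pvGet x "hand").getD "").toList.length
          ≤ (hs.map (fun x => ((pvGet x "hand").getD "").toList.length)).sum := this
      simp only [pvChars]
      omega)
    (by omega)
  have hcast : ((0 : Nat) : Int) = (0 : Int) := by norm_num
  rw [hcast] at hspec
  have hsorted : PySem.List.sorted hs pvKey true = customSortF fuel hs 0 := by
    refine Eq.trans ?_ (PySem.List.sorted_rev_eq_of_perm_of_pairwise_gt hs _ pvKey hspec.1 hspec.2)
    exact pv_sorted_decInst hs pvKey _ _
  show findTotalForCardsOfType hs sr = findTotalForCardsOfType_alt hs sr
  unfold findTotalForCardsOfType findTotalForCardsOfType_alt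
  rw [hsorted, ← hfueldef]
  show [(List.foldl (fun (acc : Int × Int) hand => (acc.1 + acc.2 * pvBid hand, acc.2 - 1))
            ((0:Int), sr) (customSortF fuel hs 0)).1,
        (List.foldl (fun (acc : Int × Int) hand => (acc.1 + acc.2 * pvBid hand, acc.2 - 1))
            ((0:Int), sr) (customSortF fuel hs 0)).2]
      = [((PySem.List.enumerate (customSortF fuel hs 0)).map
            (fun p => (sr - p.1) * pvBid p.2)).sum,
         sr - (customSortF fuel hs 0).length]
  rw [pv_fold_total]
  simp
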